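-- pv_equiv track=rewrite | github.com/olgaya90/Python_START | HW_6/task_1.py | find
-- ===== SOURCE A (Python) =====
-- def find(exp, sech_operand):
--     ind_start = 0
--     ind_finish = 0
--     ind_oper = 0
--     operands_full = ['*', '/', '-', '+']
--     operands = ['*', '/', '-', '+']
--     for op in sech_operand:
--         operands.remove(op)
--     found = False
--     for i, sim in enumerate(exp):
--         if i == 0 and sim == '-':
--             continue
--         if not found and sim in operands:
--             ind_start = i + 1
--         elif found and sim in operands_full:
--             ind_finish = i - 1
--             return ind_start, ind_finish, ind_oper
--         elif sim in sech_operand: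
--             found = True
--             ind_oper = i
--             ind_finish = len(exp) - 1
--     return ind_start, ind_finish, ind_oper
-- ===== SOURCE B (Python) =====
-- def find(exp, sech_operand):
--     full = ['*', '/', '-', '+']
--     others = ['*', '/', '-', '+']
--     for op in sech_operand:
--         others.remove(op)
--
--     def skipped(i, c):
--         return i == 0 and c == '-'
--
--     # one pass that splits exp at the first searched operator
--     before = []
--     rest = []
--     p = None
--     for i, c in enumerate(exp):
--         if p is not None:
--             rest.append((i, c))
--         elif not skipped(i, c) and c in sech_operand:
--             p = i
--         else:
--             before.append((i, c))
--
--     # nearest non-searched operator to the left -> start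
--     start = 0
--     for i, c in reversed(before):
--         if not skipped(i, c) and c in others:
--             start = i + 1
--             break
--
--     if p is None:
--         return start, 0, 0
--
--     # nearest operator to the right -> finish
--     finish = len(exp) - 1
--     for i, c in rest:
--         if c in full:
--             finish = i - 1
--             break
--     return start, finish, p
-- ===== Notes on version B (the rewrite author's own statement) =====
-- stated objective: alternative
-- what changed: A's single stateful scan with a found-flag and in-loop early return is replaced by a decomposition: split the expression at the first searched operator, then two independent boundary scans (backward over the prefix for ind_start, forward over the remainder for ind_finish).
import Mathlib
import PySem

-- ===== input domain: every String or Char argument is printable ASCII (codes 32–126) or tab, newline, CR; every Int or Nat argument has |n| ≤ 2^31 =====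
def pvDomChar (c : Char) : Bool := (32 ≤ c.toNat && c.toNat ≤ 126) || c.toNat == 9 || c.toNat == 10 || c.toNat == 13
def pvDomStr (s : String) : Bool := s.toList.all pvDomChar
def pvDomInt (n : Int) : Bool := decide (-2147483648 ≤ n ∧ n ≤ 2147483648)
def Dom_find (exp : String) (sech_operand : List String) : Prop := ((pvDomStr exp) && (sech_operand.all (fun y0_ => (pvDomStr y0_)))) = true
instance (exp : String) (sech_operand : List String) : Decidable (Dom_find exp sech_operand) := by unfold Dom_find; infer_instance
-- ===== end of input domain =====

-- B replaces A's single stateful scan (flag + early return) by a split at the first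
-- searched operator plus two independent boundary scans (backward for start, forward
-- for finish); objective: alternative decomposition, same cost.

-- ===== PORT A =====
-- the for-loop of A over enumerate(exp), state (ind_start, ind_finish, ind_oper, found);
-- the 'return' inside the loop is the non-recursive branch
def findLoopA (sech_operand operands : List String) (n : Int) :
    List (Int × Char) → Int → Int → Int → Bool → Int × Int × Int
  | [], s, f, o, _ => (s, f, o)
  | (i, sim) :: rest, s, f, o, found =>
    if i == 0 && sim == '-' then
      findLoopA sech_operand operands n rest s f o found
    else if !found && operands.contains sim.toString then
      findLoopA sech_operand operands n rest (i + 1) f o found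
    else if found && (["*", "/", "-", "+"] : List String).contains sim.toString then
      (s, i - 1, o)
    else if sech_operand.contains sim.toString then
      findLoopA sech_operand operands n rest s (n - 1) i true
    else
      findLoopA sech_operand operands n rest s f o found

def find (exp : String) (sech_operand : List String) : Int × Int × Int :=
  -- operands.remove(op) raises ValueError when op is absent (excluded by Pre_find);
  -- the total port keeps acc unchanged there
  let operands := sech_operand.foldl
    (fun acc op => (PySem.List.remove? acc op).getD acc) ["*", "/", "-", "+"]
  findLoopA sech_operand operands (PySem.Str.len exp) (PySem.List.enumerate exp.toList 0) 0 0 0 false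

-- ===== PORT B =====
-- B's first loop: split enumerate(exp) at the first searched operator (skipping a leading '-')
def findAltSplit (sech_operand : List String) :
    List (Int × Char) → List (Int × Char) × Option (Int × List (Int × Char))
  | [] => ([], none)
  | (i, c) :: rest =>
    if !(i == 0 && c == '-') && sech_operand.contains c.toString then
      ([], some (i, rest))
    else
      let (b, r) := findAltSplit sech_operand rest
      ((i, c) :: b, r)

-- B's backward scan with break over `before` = find? on the reversed list
def findAltStart (others : List String) (before : List (Int × Char)) : Int :=
  match before.reverse.find?
      (fun ic => !(ic.1 == 0 && ic.2 == '-') && others.contains ic.2.toString) with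
  | none => 0
  | some ic => ic.1 + 1

-- B's forward scan with break over `rest`
def findAltFinish (n : Int) (rest : List (Int × Char)) : Int :=
  match rest.find? (fun ic => (["*", "/", "-", "+"] : List String).contains ic.2.toString) with
  | none => n - 1
  | some ic => ic.1 - 1

def find_alt (exp : String) (sech_operand : List String) : Int × Int × Int :=
  -- B builds others by the same list.remove idiom (getD: total form, exact inside Pre_find)
  let others := sech_operand.foldl
    (fun acc op => (PySem.List.remove? acc op).getD acc) ["*", "/", "-", "+"]
  match findAltSplit sech_operand (PySem.List.enumerate exp.toList 0) with
  | (before, none) => (findAltStart others before, 0, 0)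
  | (before, some (p, rest)) =>
      (findAltStart others before, findAltFinish (PySem.Str.len exp) rest, p)

-- ===== PRECONDITION & SPEC =====
-- Pre_find excludes exactly the inputs where A's operands.remove(op) raises ValueError:
-- a duplicated element of sech_operand or one that is not one of '*','/','-','+'.
def Pre_find (exp : String) (sech_operand : List String) : Prop :=
  sech_operand.Nodup ∧ sech_operand ⊆ (["*", "/", "-", "+"] : List String)
instance (exp : String) (sech_operand : List String) : Decidable (Pre_find exp sech_operand) := by
  unfold Pre_find; infer_instance

def pvWitness_find : String × List String := ("2*3+4", ["*"])

def Spec_find (exp : String) (sech_operand : List String) (out : Int × Int × Int) : Prop := out = find_alt exp sech_operand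
instance (exp : String) (sech_operand : List String) (out : Int × Int × Int) : Decidable (Spec_find exp sech_operand out) := by unfold Spec_find; infer_instance

-- ===== CLAIM (what is proved, stated in full; the proofs are below) =====
def Claim_equal_find : Prop := ∀ (exp : String) (sech_operand : List String), Dom_find exp sech_operand → Pre_find exp sech_operand → Spec_find exp sech_operand (find exp sech_operand)


-- ===== LEMMAS AND PROOFS =====

-- under Pre_find, A's fold of remove is a filter
theorem removeFold_eq_filter (sech : List String) :
    ∀ (l : List String), l.Nodup → sech.Nodup → (∀ s ∈ sech, s ∈ l) →
    sech.foldl (fun acc op => (PySem.List.remove? acc op).getD acc) l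
      = l.filter (fun x => !sech.contains x) := by
  induction sech with
  | nil => intro l _ _ _; simp
  | cons a t ih =>
    intro l hl hnd hsub
    have ha : a ∈ l := hsub a (by simp)
    have hrm : PySem.List.remove? l a = some (l.erase a) :=
      PySem.List.remove?_eq_some_erase l a ha
    have hnd' : t.Nodup := (List.nodup_cons.mp hnd).2
    have hat : a ∉ t := (List.nodup_cons.mp hnd).1
    have hstep := ih (l.erase a) (hl.erase a) hnd'
      (by
        intro s hs
        rw [List.Nodup.mem_erase_iff hl]
        exact ⟨fun h => hat (h ▸ hs), hsub s (by simp [hs])⟩)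
    rw [List.foldl_cons]
    simp only [hrm, Option.getD_some]
    rw [hstep, List.Nodup.erase_eq_filter hl, List.filter_filter]
    apply List.filter_congr
    intro x _
    by_cases hxa : x = a <;> simp [hxa]

-- the split returns (the prefix before the first searched operator, and, if found,
-- its index together with the exact remainder of the list)
theorem findAltSplit_rest_subset_tail (sech : List String) :
    ∀ (l : List (Int × Char)) (b : List (Int × Char)) (p : Int) (rest : List (Int × Char)),
    findAltSplit sech l = (b, some (p, rest)) → ∀ x ∈ rest, x ∈ l.tail := by
  intro l
  induction l with
  | nil => intro b p rest h; simp [findAltSplit] at h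
  | cons ic t ih =>
    intro b p rest h x hx
    obtain ⟨i, c⟩ := ic
    simp only [findAltSplit] at h
    split at h
    · cases h; simpa using hx
    · rcases hsp : findAltSplit sech t with ⟨b', r⟩
      rw [hsp] at h
      cases h
      have := ih b' p rest hsp x hx
      exact List.mem_of_mem_tail this

-- elements of the tail of enumerate xs 0 have a nonzero index
theorem enumerate_tail_fst_ne_zero (cs : List Char) :
    ∀ x ∈ (PySem.List.enumerate cs 0).tail, x.1 ≠ 0 := by
  cases cs with
  | nil => intro x hx; simp [PySem.List.enumerate_nil] at hx
  | cons c cs =>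
    intro x hx
    rw [PySem.List.enumerate_cons] at hx
    simp only [List.tail_cons] at hx
    rcases (PySem.List.mem_enumerate_iff _ _ _).mp hx with ⟨k, hk, hxk⟩
    subst hxk
    simp; omega

-- A's loop after `found` became true: return (s, index of first operator - 1, o),
-- or (s, f, o) if there is none
theorem loopA_found (sech operands : List String) (n : Int)
    (hsub : ∀ c : Char, sech.contains c.toString = true →
      (["*", "/", "-", "+"] : List String).contains c.toString = true) :
    ∀ (rest : List (Int × Char)), (∀ x ∈ rest, x.1 ≠ 0) → ∀ (s f o : Int),
    findLoopA sech operands n rest s f o true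
      = (s, (match rest.find?
          (fun ic => (["*", "/", "-", "+"] : List String).contains ic.2.toString) with
        | none => f
        | some ic => ic.1 - 1), o) := by
  intro rest
  induction rest with
  | nil => intro _ s f o; simp [findLoopA]
  | cons ic t ih =>
    intro hnz s f o
    obtain ⟨i, c⟩ := ic
    have hi : i ≠ 0 := hnz (i, c) (by simp)
    have hskip : (i == 0 && c == '-') = false := by simp [hi]
    rw [findLoopA, hskip]
    rw [if_neg (by simp)]
    rw [if_neg (by simp)]
    cases hfull : (["*", "/", "-", "+"] : List String).contains c.toString with
    | true =>
      rw [if_pos (by decide)]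
      rw [List.find?_cons_of_pos (by simpa using hfull)]
    | false =>
      have hsech : sech.contains c.toString = false := by
        cases h : sech.contains c.toString
        · rfl
        · rw [hsub c h] at hfull; exact absurd hfull (by simp)
      rw [if_neg (by simp), if_neg (by rw [hsech]; simp)]
      rw [ih (fun x hx => hnz x (by simp [hx])) s f o]
      rw [List.find?_cons_of_neg (by simpa using hfull)]


-- A's loop in the not-yet-found phase equals B's split followed by either the
-- backward start scan (threading the running ind_start as default) or the found phase
theorem loopA_split (sech : List String) (n : Int)
    (others : List String)
    (hothc : ∀ x : String, others.contains x
        = ((["*", "/", "-", "+"] : List String).contains x && !sech.contains x)) :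
    ∀ (l : List (Int × Char)) (s : Int),
    findLoopA sech others n l s 0 0 false
      = (match findAltSplit sech l with
        | (b, none) =>
          ((match b.reverse.find?
              (fun ic => !(ic.1 == 0 && ic.2 == '-') && others.contains ic.2.toString) with
            | none => s
            | some ic => ic.1 + 1), 0, 0)
        | (b, some (p, rest)) =>
          findLoopA sech others n rest
            (match b.reverse.find?
                (fun ic => !(ic.1 == 0 && ic.2 == '-') && others.contains ic.2.toString) with
              | none => s
              | some ic => ic.1 + 1) (n - 1) p true) := by
  intro l
  induction l with
  | nil => intro s; simp [findLoopA, findAltSplit]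
  | cons ic t ih =>
    intro s
    obtain ⟨i, c⟩ := ic
    cases hskip : (i == 0 && c == '-') with
    | true =>
      -- skipped character: both sides ignore it
      rw [findLoopA, hskip, if_pos rfl, ih s, findAltSplit, hskip]
      rw [if_neg (by simp)]
      rcases hsp : findAltSplit sech t with ⟨b, r⟩
      have hrev : ((i, c) :: b).reverse.find?
            (fun ic => !(ic.1 == 0 && ic.2 == '-') && others.contains ic.2.toString)
          = b.reverse.find?
            (fun ic => !(ic.1 == 0 && ic.2 == '-') && others.contains ic.2.toString) := by
        rw [List.reverse_cons, List.find?_append]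
        have : ([((i, c) : Int × Char)].find?
            (fun ic => !(ic.1 == 0 && ic.2 == '-') && others.contains ic.2.toString)) = none := by
          rw [List.find?_cons_of_neg (by rw [hskip]; simp)]; rfl
        rw [this, Option.or_none]
      cases r with
      | none => dsimp only; rw [hrev]
      | some pr => obtain ⟨p, rest⟩ := pr; dsimp only; rw [hrev]
    | false =>
      cases hsech : sech.contains c.toString with
      | true =>
        -- first searched operator: found becomes true
        have hoc : others.contains c.toString = false := by
          rw [hothc, hsech]; simp
        rw [findLoopA, hskip, if_neg (by simp)]
        rw [if_neg (by rw [hoc]; simp), if_neg (by simp), if_pos (by rw [hsech])]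
        rw [findAltSplit, hskip, if_pos (by rw [hsech]; simp)]
        dsimp only
        rw [List.reverse_nil, List.find?_nil]
      | false =>
        cases hoc : others.contains c.toString with
        | true =>
          -- a non-searched operator: A updates ind_start, B finds it last in reverse
          rw [findLoopA, hskip, if_neg (by simp), if_pos (by rw [hoc]; decide), ih (i + 1),
            findAltSplit, hskip, if_neg (by rw [hsech]; simp)]
          rcases hsp : findAltSplit sech t with ⟨b, r⟩
          have hrev : ∀ d : Int,
              (match ((i, c) :: b).reverse.find?
                (fun ic => !(ic.1 == 0 && ic.2 == '-') && others.contains ic.2.toString) with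
              | none => d
              | some ic => ic.1 + 1)
              = (match b.reverse.find?
                (fun ic => !(ic.1 == 0 && ic.2 == '-') && others.contains ic.2.toString) with
              | none => i + 1
              | some ic => ic.1 + 1) := by
            intro d
            rw [List.reverse_cons, List.find?_append]
            cases hb : b.reverse.find?
                (fun ic => !(ic.1 == 0 && ic.2 == '-') && others.contains ic.2.toString) with
            | none =>
              rw [List.find?_cons_of_pos (by rw [hskip, hoc]; simp)]
              rfl
            | some x => rfl
          cases r with
          | none => dsimp only; rw [hrev]
          | some pr => obtain ⟨p, rest⟩ := pr; dsimp only; rw [hrev]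
        | false =>
          -- an ordinary character: both sides skip it
          rw [findLoopA, hskip, if_neg (by simp), if_neg (by rw [hoc]; simp), if_neg (by simp),
            if_neg (by rw [hsech]; simp), ih s, findAltSplit, hskip, if_neg (by rw [hsech]; simp)]
          rcases hsp : findAltSplit sech t with ⟨b, r⟩
          have hrev : ((i, c) :: b).reverse.find?
                (fun ic => !(ic.1 == 0 && ic.2 == '-') && others.contains ic.2.toString)
              = b.reverse.find?
                (fun ic => !(ic.1 == 0 && ic.2 == '-') && others.contains ic.2.toString) := by
            rw [List.reverse_cons, List.find?_append]
            rw [List.find?_cons_of_neg (by rw [hoc]; simp), List.find?_nil, Option.or_none]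
          cases r with
          | none => dsimp only; rw [hrev]
          | some pr => obtain ⟨p, rest⟩ := pr; dsimp only; rw [hrev]

-- ===== VERDICT (by name: the statement is the Claim_ definition above) =====
theorem find_spec : Claim_equal_find := by
  intro exp sech _hdom hpre
  obtain ⟨hnd, hsub⟩ := hpre
  unfold Spec_find find find_alt
  have hop : sech.foldl (fun acc op => (PySem.List.remove? acc op).getD acc)
        (["*", "/", "-", "+"] : List String)
      = (["*", "/", "-", "+"] : List String).filter (fun x => !sech.contains x) :=
    removeFold_eq_filter sech _ (by decide) hnd (fun s hs => hsub hs)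
  simp only [hop]
  have hothc : ∀ x : String,
      ((["*", "/", "-", "+"] : List String).filter (fun c => !sech.contains c)).contains x
        = ((["*", "/", "-", "+"] : List String).contains x && !sech.contains x) := by
    intro x
    by_cases hx : x ∈ (["*", "/", "-", "+"] : List String) <;>
      by_cases hs : x ∈ sech <;>
      simp [List.mem_filter, hx, hs]
  have hsubC : ∀ c : Char, sech.contains c.toString = true →
      (["*", "/", "-", "+"] : List String).contains c.toString = true := by
    intro c hc
    rw [List.contains_iff_mem] at hc ⊢
    exact hsub hc
  rw [loopA_split sech (PySem.Str.len exp) _ hothc (PySem.List.enumerate exp.toList 0) 0]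
  rcases hsp : findAltSplit sech (PySem.List.enumerate exp.toList 0) with ⟨b, r⟩
  cases r with
  | none => rfl
  | some pr =>
    obtain ⟨p, rest⟩ := pr
    have hnz : ∀ x ∈ rest, x.1 ≠ 0 := by
      intro x hx
      exact enumerate_tail_fst_ne_zero exp.toList x
        (findAltSplit_rest_subset_tail sech _ b p rest hsp x hx)
    dsimp only
    rw [loopA_found sech _ (PySem.Str.len exp) hsubC rest hnz]
    rfl
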